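-- pv_equiv track=rewrite | github.com/sl33pyC01E/VAEpp | experiments/cpu_vae.py | _morton_curve
-- ===== SOURCE A (Python) =====
-- def _morton_curve(h, w):
--     coords = []
--     for i in range(h):
--         for j in range(w):
--             z = 0
--             for bit in range(16):
--                 z |= ((i >> bit) & 1) << (2 * bit + 1)
--                 z |= ((j >> bit) & 1) << (2 * bit)
--             coords.append((z, i * w + j))
--     coords.sort()
--     return [c[1] for c in coords]
-- ===== SOURCE B (Python) =====
-- def _z(i, j):
--     z = 0
--     for bit in range(16):
--         z |= ((i >> bit) & 1) << (2 * bit + 1)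
--         z |= ((j >> bit) & 1) << (2 * bit)
--     return z
--
--
-- def _morton_curve(h, w):
--     pairs = [(_z(i, j), i * w + j) for i in range(h) for j in range(w)]
--     # LSD radix sort on z, two bits per round; stability makes equal-z entries
--     # keep index order, which is exactly the tuple sort's tie-break since the
--     # indices are strictly increasing.
--     for k in range(16):
--         shift = 2 * k
--         b0, b1, b2, b3 = [], [], [], []
--         for p in pairs:
--             d = (p[0] >> shift) & 3
--             if d == 0:
--                 b0.append(p)
--             elif d == 1:
--                 b1.append(p)
--             elif d == 2:
--                 b2.append(p)
--             else:
--                 b3.append(p)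
--         pairs = b0 + b1 + b2 + b3
--     return [p[1] for p in pairs]
-- ===== Notes on version B (the rewrite author's own statement) =====
-- stated objective: alternative
-- what changed: Replaces the comparison sort of (z,index) tuples by an LSD radix sort: 16 stable 4-way partition passes over the base-4 digits of z, whose stability reproduces the tuple sort's index tie-break exactly.
import Mathlib
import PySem

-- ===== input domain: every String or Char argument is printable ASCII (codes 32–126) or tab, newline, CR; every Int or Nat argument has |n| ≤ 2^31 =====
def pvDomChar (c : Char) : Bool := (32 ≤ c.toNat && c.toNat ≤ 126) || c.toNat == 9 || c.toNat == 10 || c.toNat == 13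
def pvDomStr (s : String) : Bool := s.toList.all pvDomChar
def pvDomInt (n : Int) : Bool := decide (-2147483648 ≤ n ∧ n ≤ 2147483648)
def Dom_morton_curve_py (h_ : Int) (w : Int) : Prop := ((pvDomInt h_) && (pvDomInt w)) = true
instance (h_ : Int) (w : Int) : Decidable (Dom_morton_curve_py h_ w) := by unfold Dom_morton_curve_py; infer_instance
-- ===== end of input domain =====

-- B replaces A's comparison sort of (z, index) tuples by an LSD radix sort
-- (16 stable 4-way partition passes over the base-4 digits of z); objective: alternative.

-- ===== PORT A =====
-- Python's  x >> k  /  x << k  on our nonnegative shift counts (PYSEM: they are core's '>>>'/'<<<' with a Nat count)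
def pvShr (x : Int) (k : Nat) : Int := x >>> k
def pvShl (x : Int) (k : Nat) : Int := x <<< k

-- the inner 16-iteration bit-interleaving loop (identical in both Pythons)
def pvZ (i j : Int) : Int :=
  (PySem.List.pyRange 0 16 1).foldl (fun z bit =>
    PySem.Int.bor (PySem.Int.bor z (pvShl (PySem.Int.band (pvShr i bit.toNat) 1) (2*bit+1).toNat))
      (pvShl (PySem.Int.band (pvShr j bit.toNat) 1) (2*bit).toNat)) 0

def morton_curve_py (h_ : Int) (w : Int) : List Int :=
  let coords : List (Int × Int) :=
    (PySem.List.pyRange 0 h_ 1).foldl (fun acc i =>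
      (PySem.List.pyRange 0 w 1).foldl (fun acc2 j =>
        acc2 ++ [(pvZ i j, i * w + j)]) acc) []
  (PySem.List.sorted2 coords (fun c => c.1) (fun c => c.2)).map (fun c => c.2)

-- ===== PORT B =====
def pvDig (s : Nat) (z : Int) : Int := PySem.Int.band (pvShr z s) 3

-- the body of Source B's partition loop: route p into one of the four buckets by its digit
def pvStep (s : Nat)
    (acc : List (Int × Int) × List (Int × Int) × List (Int × Int) × List (Int × Int))
    (p : Int × Int) :
    List (Int × Int) × List (Int × Int) × List (Int × Int) × List (Int × Int) :=
  if pvDig s p.1 = 0 then (acc.1 ++ [p], acc.2.1, acc.2.2.1, acc.2.2.2)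
  else if pvDig s p.1 = 1 then (acc.1, acc.2.1 ++ [p], acc.2.2.1, acc.2.2.2)
  else if pvDig s p.1 = 2 then (acc.1, acc.2.1, acc.2.2.1 ++ [p], acc.2.2.2)
  else (acc.1, acc.2.1, acc.2.2.1, acc.2.2.2 ++ [p])

-- one stable 4-way partition pass of Source B's radix loop
def pvRound (s : Nat) (xs : List (Int × Int)) : List (Int × Int) :=
  let r := xs.foldl (pvStep s) ([], [], [], [])
  r.1 ++ (r.2.1 ++ (r.2.2.1 ++ r.2.2.2))

def pvPairs (h_ : Int) (w : Int) : List (Int × Int) :=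
  (PySem.List.pyRange 0 h_ 1).flatMap (fun i =>
    (PySem.List.pyRange 0 w 1).map (fun j => (pvZ i j, i * w + j)))

def morton_curve_py_alt (h_ : Int) (w : Int) : List Int :=
  ((PySem.List.pyRange 0 16 1).foldl (fun ps k => pvRound (2*k).toNat ps) (pvPairs h_ w)).map
    (fun p => p.2)

-- ===== PRECONDITION & SPEC =====
def Spec_morton_curve_py (h_ : Int) (w : Int) (out : List Int) : Prop := out = morton_curve_py_alt h_ w
instance (h_ : Int) (w : Int) (out : List Int) : Decidable (Spec_morton_curve_py h_ w out) := by unfold Spec_morton_curve_py; infer_instance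

-- ===== CLAIM (what is proved, stated in full; the proofs are below) =====
def Claim_equal_morton_curve_py : Prop := ∀ (h_ : Int) (w : Int), Dom_morton_curve_py h_ w → Spec_morton_curve_py h_ w (morton_curve_py h_ w)

-- ===== LEMMAS AND PROOFS =====

-- the strict order actually realised after the first k radix rounds
def pvRk (k : Nat) (a b : Int × Int) : Prop :=
  a.1 % 4^k < b.1 % 4^k ∨ (a.1 % 4^k = b.1 % 4^k ∧ a.2 < b.2)


theorem pvBorBound {a b : Int} (ha : 0 ≤ a) (ha2 : a < 4^16) (hb : 0 ≤ b) (hb2 : b < 4^16) :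
    0 ≤ PySem.Int.bor a b ∧ PySem.Int.bor a b < 4^16 := by
  rw [PySem.Int.bor_of_nonneg ha hb]
  have h1 : a.toNat < 2^32 := by omega
  have h2 : b.toNat < 2^32 := by omega
  have h3 := Nat.or_lt_two_pow h1 h2
  refine ⟨by positivity, ?_⟩
  norm_num at h3 ⊢
  omega

theorem pvBandShift (x : Int) (m : Nat) (hm : m ≤ 31) :
    0 ≤ pvShl (PySem.Int.band x 1) m ∧ pvShl (PySem.Int.band x 1) m < 4^16 := by
  rw [pvShl, PySem.Int.band_one, Int.shiftLeft_eq]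
  have h1 : 0 ≤ PySem.Int.mod x 2 ∧ PySem.Int.mod x 2 < 2 := by simp [pysem]; omega
  have hp : (0:Int) < 2^m := pow_pos (by norm_num) m
  have h2 : (2:Int)^m ≤ 2^31 := pow_le_pow_right₀ (by norm_num) hm
  refine ⟨mul_nonneg h1.1 (le_of_lt hp), ?_⟩
  have h4 : PySem.Int.mod x 2 * 2^m ≤ 1 * 2^m :=
    mul_le_mul_of_nonneg_right (by omega) (le_of_lt hp)
  have h3 : (2:Int)^31 < 4^16 := by norm_num
  nlinarith

theorem pvZ_bounds (i j : Int) : 0 ≤ pvZ i j ∧ pvZ i j < 4^16 := by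
  unfold pvZ
  refine List.foldlRecOn (motive := fun z => 0 ≤ z ∧ z < 4^16) _ _ ⟨le_refl 0, by norm_num⟩ ?_
  · intro z hz bit hbit
    rw [PySem.List.mem_pyRange_one] at hbit
    have hb1 := pvBandShift (pvShr i bit.toNat) (2*bit+1).toNat (by omega)
    have hb2 := pvBandShift (pvShr j bit.toNat) (2*bit).toNat (by omega)
    have h1 := pvBorBound hz.1 hz.2 hb1.1 hb1.2
    exact pvBorBound h1.1 h1.2 hb2.1 hb2.2

theorem pvDig_spec (n k : Nat) : pvDig (2*k) (n : Int) = ((n / 4^k % 4 : Nat) : Int) := by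
  unfold pvDig
  have h1 : pvShr (n : Int) (2*k) = ((n >>> (2*k) : Nat) : Int) := by
    rw [pvShr]; simp [Int.natCast_shiftRight]
  rw [h1, show (3:Int) = ((3:Nat):Int) from rfl, PySem.Int.band_natCast]
  congr 1
  have h2 : n >>> (2*k) = n / 4^k := by
    rw [Nat.shiftRight_eq_div_pow, pow_mul]; norm_num
  have h3 := Nat.and_two_pow_sub_one_eq_mod (n / 4^k) 2
  norm_num at h3
  rw [h2, h3]

theorem pv_modsplit (z : Int) (hz : 0 ≤ z) (k : Nat) :
    z % 4^(k+1) = z % 4^k + 4^k * pvDig (2*k) z := by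
  conv_lhs => rw [← Int.toNat_of_nonneg hz]
  conv_rhs => rw [← Int.toNat_of_nonneg hz]
  rw [pvDig_spec]
  have := Nat.mod_pow_succ (x := z.toNat) (b := 4) (k := k)
  zify at this
  push_cast
  linarith

set_option maxRecDepth 4096 in
theorem pvPairs_mem (h_ w : Int) (p : Int × Int) (hp : p ∈ pvPairs h_ w) :
    0 ≤ p.1 ∧ p.1 < 4^16 ∧ 0 ≤ p.2 ∧ p.2 < h_ * w := by
  unfold pvPairs at hp
  simp only [List.mem_flatMap, List.mem_map, PySem.List.mem_pyRange_one] at hp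
  obtain ⟨i, ⟨hi0, hih⟩, j, ⟨hj0, hjw⟩, hpe⟩ := hp
  subst hpe
  obtain ⟨hz0, hz1⟩ := pvZ_bounds i j
  have h0 : 0 ≤ i * w := mul_nonneg hi0 (by omega)
  have h1 : (i + 1) * w ≤ h_ * w :=
    mul_le_mul_of_nonneg_right (by omega) (by omega)
  refine ⟨hz0, hz1, ?_, ?_⟩
  · show (0:Int) ≤ i * w + j
    omega
  · show i * w + j < h_ * w
    nlinarith

theorem pvPairs_pairwise (h_ w : Int) : (pvPairs h_ w).Pairwise (fun a b => a.2 < b.2) := by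
  unfold pvPairs
  rw [List.pairwise_flatMap]
  constructor
  · intro i _
    rw [List.pairwise_map]
    exact (PySem.List.pairwise_lt_pyRange_one 0 w).imp (fun hjj => by simpa using hjj)
  · refine (PySem.List.pairwise_lt_pyRange_one 0 h_).imp_of_mem ?_
    intro i1 i2 h1 h2 hlt x hx y hy
    simp only [List.mem_map, PySem.List.mem_pyRange_one] at hx hy
    obtain ⟨j1, ⟨hj10, hj1w⟩, hx⟩ := hx
    obtain ⟨j2, ⟨hj20, hj2w⟩, hy⟩ := hy
    subst hx; subst hy
    simp only
    have hk : (i1 + 1) * w ≤ i2 * w := by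
      rw [PySem.List.mem_pyRange_one] at h1 h2
      exact mul_le_mul_of_nonneg_right (by omega) (by omega)
    nlinarith

theorem pvRound_fold (s : Nat) (t : List (Int × Int)) :
    ∀ (a0 a1 a2 a3 : List (Int × Int)),
      t.foldl (pvStep s) (a0, a1, a2, a3) =
        (a0 ++ t.filter (fun p => decide (pvDig s p.1 = 0)),
         a1 ++ t.filter (fun p => decide (pvDig s p.1 = 1)),
         a2 ++ t.filter (fun p => decide (pvDig s p.1 = 2)),
         a3 ++ t.filter (fun p =>
           !decide (pvDig s p.1 = 0) && !decide (pvDig s p.1 = 1) && !decide (pvDig s p.1 = 2))) := by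
  induction t with
  | nil => simp
  | cons p t ih =>
    intro a0 a1 a2 a3
    simp only [List.foldl_cons, pvStep, List.filter_cons]
    by_cases h0 : pvDig s p.1 = 0
    · simp only [h0]
      rw [ih]
      simp
    · by_cases h1 : pvDig s p.1 = 1
      · simp only [h1]
        rw [ih]
        simp
      · by_cases h2 : pvDig s p.1 = 2
        · simp only [h2]
          rw [ih]
          simp
        · simp only [if_neg h0, if_neg h1, if_neg h2]
          rw [ih]
          simp [h0, h1, h2]

theorem pvRound_eq (s : Nat) (xs : List (Int × Int)) :
    pvRound s xs =
      xs.filter (fun p => decide (pvDig s p.1 = 0)) ++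
      (xs.filter (fun p => decide (pvDig s p.1 = 1)) ++
      (xs.filter (fun p => decide (pvDig s p.1 = 2)) ++
       xs.filter (fun p =>
         !decide (pvDig s p.1 = 0) && !decide (pvDig s p.1 = 1) && !decide (pvDig s p.1 = 2)))) := by
  unfold pvRound
  rw [pvRound_fold]
  simp

theorem pvRound_perm (s : Nat) (xs : List (Int × Int)) : (pvRound s xs).Perm xs := by
  rw [pvRound_eq]
  have h0 := List.filter_append_perm (fun p => decide (pvDig s p.1 = 0)) xs
  have e1 : (xs.filter (fun p => !decide (pvDig s p.1 = 0))).filter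
      (fun p => decide (pvDig s p.1 = 1)) = xs.filter (fun p => decide (pvDig s p.1 = 1)) := by
    rw [List.filter_filter]
    apply List.filter_congr
    intro p _
    by_cases h : pvDig s p.1 = 1 <;> simp [h]
  have h1 := List.filter_append_perm (fun p => decide (pvDig s p.1 = 1))
    (xs.filter (fun p => !decide (pvDig s p.1 = 0)))
  rw [e1, List.filter_filter] at h1
  have e2 : (xs.filter (fun p => !decide (pvDig s p.1 = 1) && !decide (pvDig s p.1 = 0))).filter
      (fun p => decide (pvDig s p.1 = 2)) = xs.filter (fun p => decide (pvDig s p.1 = 2)) := by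
    rw [List.filter_filter]
    apply List.filter_congr
    intro p _
    by_cases h : pvDig s p.1 = 2 <;> simp [h]
  have h2 := List.filter_append_perm (fun p => decide (pvDig s p.1 = 2))
    (xs.filter (fun p => !decide (pvDig s p.1 = 1) && !decide (pvDig s p.1 = 0)))
  rw [e2, List.filter_filter] at h2
  have e3 : xs.filter (fun p =>
      !decide (pvDig s p.1 = 2) && (!decide (pvDig s p.1 = 1) && !decide (pvDig s p.1 = 0))) =
      xs.filter (fun p =>
      !decide (pvDig s p.1 = 0) && !decide (pvDig s p.1 = 1) && !decide (pvDig s p.1 = 2)) := by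
    apply List.filter_congr
    intro p _
    by_cases h0' : pvDig s p.1 = 0 <;> by_cases h1' : pvDig s p.1 = 1 <;>
      by_cases h2' : pvDig s p.1 = 2 <;> simp [h0', h1', h2']
  rw [e3] at h2
  exact (((h2.append_left _).trans h1).append_left _).trans h0

theorem pvDig_range (z : Int) (hz : 0 ≤ z) (k : Nat) :
    0 ≤ pvDig (2*k) z ∧ pvDig (2*k) z < 4 := by
  conv_lhs => rw [← Int.toNat_of_nonneg hz]
  conv_rhs => rw [← Int.toNat_of_nonneg hz]
  rw [pvDig_spec]
  have := Nat.mod_lt (z.toNat / 4^k) (show 0 < 4 by norm_num)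
  omega

theorem pvRk_lt_of_dig_lt (k : Nat) (a b : Int × Int) (ha : 0 ≤ a.1) (hb : 0 ≤ b.1)
    (hd : pvDig (2*k) a.1 < pvDig (2*k) b.1) : a.1 % 4^(k+1) < b.1 % 4^(k+1) := by
  have m1 := pv_modsplit a.1 ha k
  have m2 := pv_modsplit b.1 hb k
  have hpos : (0:Int) < 4^k := pow_pos (by norm_num) k
  have ha4 : a.1 % 4^k < 4^k := Int.emod_lt_of_pos _ hpos
  have hb0 : 0 ≤ b.1 % 4^k := Int.emod_nonneg _ (ne_of_gt hpos)
  have hmul : 4^k * (pvDig (2*k) a.1 + 1) ≤ 4^k * pvDig (2*k) b.1 :=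
    mul_le_mul_of_nonneg_left (by omega) (le_of_lt hpos)
  rw [mul_add, mul_one] at hmul
  linarith

theorem pvRk_succ_of_dig_eq (k : Nat) (a b : Int × Int) (ha : 0 ≤ a.1) (hb : 0 ≤ b.1)
    (hd : pvDig (2*k) a.1 = pvDig (2*k) b.1) (h : pvRk k a b) : pvRk (k+1) a b := by
  unfold pvRk at h ⊢
  have m1 := pv_modsplit a.1 ha k
  have m2 := pv_modsplit b.1 hb k
  rcases h with h | ⟨h, hs⟩
  · left; rw [m1, m2, hd]; linarith
  · right; exact ⟨by rw [m1, m2, hd, h], hs⟩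

theorem pvRound_step (k : Nat) (ys : List (Int × Int))
    (hz : ∀ p ∈ ys, 0 ≤ p.1) (hpw : ys.Pairwise (pvRk k)) :
    (pvRound (2*k) ys).Pairwise (pvRk (k+1)) := by
  have within : ∀ (d0 : Int) (pred : Int × Int → Bool),
      (∀ p ∈ ys, pred p = true → pvDig (2*k) p.1 = d0) →
      (ys.filter pred).Pairwise (pvRk (k+1)) := by
    intro d0 pred hpred
    refine (hpw.filter pred).imp_of_mem ?_
    intro a b ha hb hab
    have hma := List.mem_filter.mp ha
    have hmb := List.mem_filter.mp hb
    exact pvRk_succ_of_dig_eq k a b (hz a hma.1) (hz b hmb.1)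
      (by rw [hpred a hma.1 hma.2, hpred b hmb.1 hmb.2]) hab
  have cross : ∀ a b, a ∈ ys → b ∈ ys → pvDig (2*k) a.1 < pvDig (2*k) b.1 → pvRk (k+1) a b :=
    fun a b ha hb h => Or.inl (pvRk_lt_of_dig_lt k a b (hz a ha) (hz b hb) h)
  have hd3 : ∀ p ∈ ys, pvDig (2*k) p.1 ≠ 0 → pvDig (2*k) p.1 ≠ 1 → pvDig (2*k) p.1 ≠ 2 →
      pvDig (2*k) p.1 = 3 := by
    intro p hp h0 h1 h2
    have := pvDig_range p.1 (hz p hp) k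
    omega
  rw [pvRound_eq, List.pairwise_append]
  refine ⟨within 0 _ (by intro p _ hp; simpa using hp), ?_, ?_⟩
  · rw [List.pairwise_append]
    refine ⟨within 1 _ (by intro p _ hp; simpa using hp), ?_, ?_⟩
    · rw [List.pairwise_append]
      refine ⟨within 2 _ (by intro p _ hp; simpa using hp), ?_, ?_⟩
      · refine within 3 _ ?_
        intro p hp hpr
        simp only [Bool.and_eq_true, Bool.not_eq_eq_eq_not, Bool.not_true, decide_eq_false_iff_not] at hpr
        exact hd3 p hp hpr.1.1 hpr.1.2 hpr.2
      · intro a ha b hb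
        have hma := List.mem_filter.mp ha
        have hmb := List.mem_filter.mp hb
        have hda : pvDig (2*k) a.1 = 2 := by simpa using hma.2
        have hdb : pvDig (2*k) b.1 = 3 := by
          simp only [Bool.and_eq_true, Bool.not_eq_eq_eq_not, Bool.not_true, decide_eq_false_iff_not] at hmb
          exact hd3 b hmb.1 hmb.2.1.1 hmb.2.1.2 hmb.2.2
        exact cross a b hma.1 hmb.1 (by omega)
    · intro a ha b hb
      have hma := List.mem_filter.mp ha
      have hda : pvDig (2*k) a.1 = 1 := by simpa using hma.2
      rcases List.mem_append.mp hb with hb' | hb'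
      · have hmb := List.mem_filter.mp hb'
        have hdb : pvDig (2*k) b.1 = 2 := by simpa using hmb.2
        exact cross a b hma.1 hmb.1 (by omega)
      · have hmb := List.mem_filter.mp hb'
        have hdb : pvDig (2*k) b.1 = 3 := by
          simp only [Bool.and_eq_true, Bool.not_eq_eq_eq_not, Bool.not_true, decide_eq_false_iff_not] at hmb
          exact hd3 b hmb.1 hmb.2.1.1 hmb.2.1.2 hmb.2.2
        exact cross a b hma.1 (List.mem_filter.mp hb').1 (by omega)
  · intro a ha b hb
    have hma := List.mem_filter.mp ha
    have hda : pvDig (2*k) a.1 = 0 := by simpa using hma.2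
    have hbmem : b ∈ ys ∧ 1 ≤ pvDig (2*k) b.1 := by
      rcases List.mem_append.mp hb with hb' | hb'
      · have hmb := List.mem_filter.mp hb'
        have : pvDig (2*k) b.1 = 1 := by simpa using hmb.2
        exact ⟨hmb.1, by omega⟩
      · rcases List.mem_append.mp hb' with hb'' | hb''
        · have hmb := List.mem_filter.mp hb''
          have : pvDig (2*k) b.1 = 2 := by simpa using hmb.2
          exact ⟨hmb.1, by omega⟩
        · have hmb := List.mem_filter.mp hb''
          have : pvDig (2*k) b.1 = 3 := by
            simp only [Bool.and_eq_true, Bool.not_eq_eq_eq_not, Bool.not_true, decide_eq_false_iff_not] at hmb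
            exact hd3 b hmb.1 hmb.2.1.1 hmb.2.1.2 hmb.2.2
          exact ⟨hmb.1, by omega⟩
    exact cross a b hma.1 hbmem.1 (by omega)

theorem pv_rounds_inv (P : List (Int × Int)) (hz : ∀ p ∈ P, 0 ≤ p.1)
    (h0 : P.Pairwise (fun a b => a.2 < b.2)) (n : Nat) :
    ((List.range n).foldl (fun ps k => pvRound (2*k) ps) P).Perm P ∧
      ((List.range n).foldl (fun ps k => pvRound (2*k) ps) P).Pairwise (pvRk n) := by
  induction n with
  | zero =>
    refine ⟨List.Perm.refl P, ?_⟩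
    refine h0.imp ?_
    intro a b hab
    right
    simp
    exact hab
  | succ n ih =>
    rw [List.range_succ, List.foldl_append, List.foldl_cons, List.foldl_nil]
    set ys := (List.range n).foldl (fun ps k => pvRound (2*k) ps) P with hys
    have hz' : ∀ p ∈ ys, 0 ≤ p.1 := fun p hp => hz p (ih.1.mem_iff.mp hp)
    exact ⟨(pvRound_perm (2*n) ys).trans ih.1, pvRound_step n ys hz' ih.2⟩

theorem insertBy_congr {α : Type} (f g : α → α → Bool) (x : α) (ys : List α)
    (h : ∀ y ∈ ys, f x y = g x y) : PySem.List.insertBy f x ys = PySem.List.insertBy g x ys := by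
  induction ys with
  | nil => rfl
  | cons y t ih =>
    simp only [PySem.List.insertBy]
    rw [h y (by simp)]
    by_cases hg : g x y = true
    · simp [hg]
    · simp only [Bool.not_eq_true] at hg
      simp [hg]
      exact ih (fun y hy => h y (by simp [hy]))

theorem foldl_insertBy_congr {α : Type} (f g : α → α → Bool) (S : List α)
    (h : ∀ a ∈ S, ∀ b ∈ S, f a b = g a b) :
    ∀ (xs acc : List α), (∀ a ∈ xs, a ∈ S) → (∀ b ∈ acc, b ∈ S) →
      xs.foldl (fun acc x => PySem.List.insertBy f x acc) acc =
        xs.foldl (fun acc x => PySem.List.insertBy g x acc) acc := by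
  intro xs
  induction xs with
  | nil => intro acc _ _; rfl
  | cons x t ih =>
    intro acc hxs hacc
    simp only [List.foldl_cons]
    rw [insertBy_congr f g x acc (fun y hy => h x (hxs x (by simp)) y (hacc y hy))]
    apply ih
    · intro a ha; exact hxs a (by simp [ha])
    · intro b hb
      rcases (PySem.List.mem_insertBy g x b acc).mp hb with hb' | hb'
      · subst hb'; exact hxs b (by simp)
      · exact hacc b hb'

theorem pv_before_eq (M : Int) (a b : Int × Int)
    (ha : 0 ≤ a.2 ∧ a.2 < M) (hb : 0 ≤ b.2 ∧ b.2 < M) :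
    (decide (a.1 < b.1) || (!decide (b.1 < a.1) && decide (a.2 < b.2))) =
      decide (a.1 * M + a.2 < b.1 * M + b.2) := by
  rcases lt_trichotomy a.1 b.1 with h | h | h
  · have he : a.1 * M + a.2 < b.1 * M + b.2 := by
      have h1 : (a.1 + 1) * M ≤ b.1 * M := mul_le_mul_of_nonneg_right (by omega) (by omega)
      nlinarith
    simp [h, he]
  · simp [h]
  · have he : ¬(a.1 * M + a.2 < b.1 * M + b.2) := by
      have h1 : (b.1 + 1) * M ≤ a.1 * M := mul_le_mul_of_nonneg_right (by omega) (by omega)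
      nlinarith
    simp [he, not_lt_of_gt h, h]

theorem pv_sorted2_eq (xs ys : List (Int × Int)) (M : Int)
    (hmem : ∀ p ∈ xs, 0 ≤ p.2 ∧ p.2 < M)
    (hperm : ys.Perm xs)
    (hpw : ys.Pairwise (fun a b => a.1 < b.1 ∨ (a.1 = b.1 ∧ a.2 < b.2))) :
    PySem.List.sorted2 xs (fun c => c.1) (fun c => c.2) = ys := by
  have hys : ∀ p ∈ ys, 0 ≤ p.2 ∧ p.2 < M := fun p hp => hmem p (hperm.mem_iff.mp hp)
  have hsorted : PySem.List.sorted xs (fun c => c.1 * M + c.2) = ys := by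
    apply PySem.List.sorted_eq_of_perm_of_pairwise_lt xs ys (fun c => c.1 * M + c.2) hperm
    refine hpw.imp_of_mem ?_
    intro a b hma hmb hab
    obtain ⟨ha0, haM⟩ := hys a hma
    obtain ⟨hb0, hbM⟩ := hys b hmb
    rcases hab with h | ⟨h, hs⟩
    · have h1 : (a.1 + 1) * M ≤ b.1 * M := mul_le_mul_of_nonneg_right (by omega) (by omega)
      nlinarith
    · rw [h]; omega
  have hcongr : PySem.List.sorted2 xs (fun c => c.1) (fun c => c.2) =
      PySem.List.sorted xs (fun c => c.1 * M + c.2) := by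
    show xs.foldl (fun acc x => PySem.List.insertBy
        (fun a b => decide (a.1 < b.1) || (!decide (b.1 < a.1) && decide (a.2 < b.2))) x acc) [] =
      xs.foldl (fun acc x => PySem.List.insertBy
        (fun a b => decide (a.1 * M + a.2 < b.1 * M + b.2)) x acc) []
    exact foldl_insertBy_congr _ _ xs
      (fun a ha b hb => pv_before_eq M a b (hmem a ha) (hmem b hb))
      xs [] (fun a ha => ha) (by simp)
  rw [hcongr, hsorted]

theorem pv_coords_eq (h_ w : Int) :
    (PySem.List.pyRange 0 h_ 1).foldl (fun acc i =>
      (PySem.List.pyRange 0 w 1).foldl (fun acc2 j =>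
        acc2 ++ [(pvZ i j, i * w + j)]) acc) [] = pvPairs h_ w := by
  unfold pvPairs
  have hsingle : ∀ (f : Int → Int × Int) (l : List Int),
      l.flatMap (fun j => [f j]) = l.map f := by
    intro f l
    induction l with
    | nil => rfl
    | cons a t ih => simp [ih]
  rw [PySem.List.foldl_congr_mem _ _
    (fun acc i => acc ++ (PySem.List.pyRange 0 w 1).map (fun j => (pvZ i j, i * w + j))) []
    (by
      intro acc i _
      rw [PySem.List.foldl_append_eq_flatMap (fun j => [(pvZ i j, i * w + j)])]
      rw [hsingle (fun j => (pvZ i j, i * w + j))])]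
  rw [PySem.List.foldl_append_eq_flatMap]
  simp

-- ===== VERDICT (by name: the statement is the Claim_ definition above) =====
theorem morton_curve_py_spec : Claim_equal_morton_curve_py := by
  intro h_ w _
  unfold Spec_morton_curve_py
  have hA : morton_curve_py h_ w =
      (PySem.List.sorted2 ((PySem.List.pyRange 0 h_ 1).foldl (fun acc i =>
        (PySem.List.pyRange 0 w 1).foldl (fun acc2 j => acc2 ++ [(pvZ i j, i * w + j)]) acc) [])
        (fun c => c.1) (fun c => c.2)).map (fun c => c.2) := rfl
  rw [hA, pv_coords_eq]
  unfold morton_curve_py_alt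
  have hfold : (PySem.List.pyRange 0 16 1).foldl (fun ps k => pvRound (2*k).toNat ps) (pvPairs h_ w) =
      (List.range 16).foldl (fun ps k => pvRound (2*k) ps) (pvPairs h_ w) := by
    rw [show PySem.List.pyRange 0 16 1 = [0,1,2,3,4,5,6,7,8,9,10,11,12,13,14,15] from by decide]
    rw [show List.range 16 = [0,1,2,3,4,5,6,7,8,9,10,11,12,13,14,15] from by decide]
    simp only [List.foldl_cons, List.foldl_nil]
    rfl
  rw [hfold]
  obtain ⟨hperm, hpw⟩ := pv_rounds_inv (pvPairs h_ w)
    (fun p hp => (pvPairs_mem h_ w p hp).1) (pvPairs_pairwise h_ w) 16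
  have hlex : ((List.range 16).foldl (fun ps k => pvRound (2*k) ps) (pvPairs h_ w)).Pairwise
      (fun a b : Int × Int => a.1 < b.1 ∨ (a.1 = b.1 ∧ a.2 < b.2)) := by
    refine hpw.imp_of_mem ?_
    intro a b hma hmb hab
    have ba := pvPairs_mem h_ w a (hperm.mem_iff.mp hma)
    have bb := pvPairs_mem h_ w b (hperm.mem_iff.mp hmb)
    unfold pvRk at hab
    rw [Int.emod_eq_of_lt ba.1 ba.2.1, Int.emod_eq_of_lt bb.1 bb.2.1] at hab
    exact hab
  rw [pv_sorted2_eq (pvPairs h_ w) _ (h_ * w)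
    (fun p hp => ⟨(pvPairs_mem h_ w p hp).2.2.1, (pvPairs_mem h_ w p hp).2.2.2⟩) hperm hlex]
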